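-- pv_equiv track=rewrite | github.com/Rosen-Popov/ChemistrySolver | helper_fs.py | exist_in_both
-- ===== SOURCE A (Python) =====
-- def exist_in_both(source,loc):
--     matches = 0
--     if len(source) != len(loc):
--         return -1
--     for i in range(0,len(source)):
--         if source[i] != 0 and loc[i] != 0:
--             matches+=1
--     return matches
-- ===== SOURCE B (Python) =====
-- def exist_in_both(source, loc):
--     if len(source) != len(loc):
--         return -1
--     s = {i for i, x in enumerate(source) if x != 0}
--     l = {i for i, x in enumerate(loc) if x != 0}
--     return len(s & l)
-- ===== Notes on version B (the rewrite author's own statement) =====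
-- stated objective: alternative
-- what changed: Replaces A's single indexed counting loop by two independent passes that build the set of nonzero indices of each list and returns the size of their set intersection (same -1 guard on unequal lengths).
import Mathlib
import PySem

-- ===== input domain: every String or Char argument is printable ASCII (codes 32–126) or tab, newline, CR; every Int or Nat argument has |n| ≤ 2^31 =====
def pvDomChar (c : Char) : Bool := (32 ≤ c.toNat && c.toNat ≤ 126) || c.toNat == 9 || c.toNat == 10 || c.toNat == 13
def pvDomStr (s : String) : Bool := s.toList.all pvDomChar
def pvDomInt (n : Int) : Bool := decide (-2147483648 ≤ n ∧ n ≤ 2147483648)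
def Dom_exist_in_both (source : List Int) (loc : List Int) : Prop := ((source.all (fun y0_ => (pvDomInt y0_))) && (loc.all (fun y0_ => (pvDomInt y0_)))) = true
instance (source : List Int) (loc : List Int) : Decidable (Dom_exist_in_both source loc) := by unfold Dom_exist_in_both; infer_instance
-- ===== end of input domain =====

-- B replaces A's single elementwise counting loop by building the two nonzero-index
-- sets independently and returning the size of their intersection (objective: alternative).

-- ===== PORT A =====
-- for i in range(0, len(source)): if source[i] != 0 and loc[i] != 0: matches += 1
-- (pyGetD is exact here: every i drawn from the range is in bounds for both lists)
def exist_in_both (source : List Int) (loc : List Int) : Int :=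
  if source.length ≠ loc.length then -1
  else
    (PySem.List.pyRange 0 (source.length : Int) 1).foldl
      (fun m i =>
        if (PySem.List.pyGetD source i 0 != 0) && (PySem.List.pyGetD loc i 0 != 0)
        then m + 1 else m) 0

-- ===== PORT B =====
-- {i for i, x in enumerate(xs) if x != 0}
def pvNonzeroIdx (xs : List Int) : PySem.Set Int :=
  PySem.Set.ofList
    ((PySem.List.enumerate xs).filterMap (fun p => if p.2 != 0 then some p.1 else none))

-- len(s & l) after the length guard
def exist_in_both_alt (source : List Int) (loc : List Int) : Int :=
  if source.length ≠ loc.length then -1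
  else
    PySem.Set.len (PySem.Set.inter (pvNonzeroIdx source) (pvNonzeroIdx loc))

-- ===== PRECONDITION & SPEC =====
def Spec_exist_in_both (source : List Int) (loc : List Int) (out : Int) : Prop := out = exist_in_both_alt source loc
instance (source : List Int) (loc : List Int) (out : Int) : Decidable (Spec_exist_in_both source loc out) := by unfold Spec_exist_in_both; infer_instance

-- ===== CLAIM (what is proved, stated in full; the proofs are below) =====
def Claim_equal_exist_in_both : Prop := ∀ (source : List Int) (loc : List Int), Dom_exist_in_both source loc → Spec_exist_in_both source loc (exist_in_both source loc)

-- ===== LEMMAS AND PROOFS =====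

-- filterMap with an if-guard is a filter
theorem filterMap_if_eq_filter {α : Type} (p : α → Bool) (l : List α) :
    l.filterMap (fun x => if p x then some x else none) = l.filter p := by
  induction l with
  | nil => rfl
  | cons a t ih => by_cases h : p a <;> simp [h, ih]

-- ofList of a Nodup list is the list itself
theorem ofList_add_of_nodup {α : Type} [BEq α] [LawfulBEq α] (xs acc : PySem.Set α)
    (h : (acc ++ xs).Nodup) : xs.foldl PySem.Set.add acc = acc ++ xs := by
  induction xs generalizing acc with
  | nil => simp
  | cons a t ih =>
    have hna : a ∉ acc := by
      simp only [List.nodup_append, List.nodup_cons] at h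
      intro hmem
      exact h.2.2 a hmem a (by simp) rfl
    have := ih (acc ++ [a]) (by simpa using h)
    simpa [List.foldl_cons, PySem.Set.add, hna] using this

theorem ofList_of_nodup {α : Type} [BEq α] [LawfulBEq α] (xs : List α) (h : xs.Nodup) :
    PySem.Set.ofList xs = xs := by
  simpa using ofList_add_of_nodup xs [] (by simpa using h)

-- the nonzero-index "set" is the filtered range (and hence Nodup, so ofList keeps it)
theorem pvNonzeroIdx_eq_filter (xs : List Int) :
    pvNonzeroIdx xs =
      (PySem.List.pyRange 0 (xs.length : Int) 1).filter
        (fun j => PySem.List.pyGetD xs j 0 != 0) := by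
  unfold pvNonzeroIdx
  rw [PySem.List.enumerate_eq_map_pyRange xs 0, List.filterMap_map]
  have hcomp : ((fun p : Int × Int => if p.2 != 0 then some p.1 else none) ∘
      (fun j => (j, PySem.List.pyGetD xs j 0))) =
      (fun j => if (PySem.List.pyGetD xs j 0 != 0) then some j else none) := by
    funext j; by_cases h : PySem.List.pyGetD xs j 0 = 0 <;> simp [h]
  rw [hcomp, filterMap_if_eq_filter]
  exact ofList_of_nodup _ ((PySem.List.nodup_pyRange_one _ _).filter _)

theorem mem_pvNonzeroIdx (xs : List Int) (i : Int) :
    i ∈ pvNonzeroIdx xs ↔ 0 ≤ i ∧ i < (xs.length : Int) ∧ PySem.List.pyGetD xs i 0 ≠ 0 := by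
  rw [pvNonzeroIdx_eq_filter]
  simp [List.mem_filter, PySem.List.mem_pyRange_one, and_assoc]

-- ===== VERDICT (by name: the statement is the Claim_ definition above) =====
theorem exist_in_both_spec : Claim_equal_exist_in_both := by
  intro source loc _
  unfold Spec_exist_in_both exist_in_both exist_in_both_alt
  by_cases hlen : source.length ≠ loc.length
  · simp [hlen]
  · rw [not_not] at hlen
    simp only [hlen, ne_eq, not_true_eq_false, if_neg, not_false_eq_true]
    rw [PySem.List.foldl_count_if]
    have hs := pvNonzeroIdx_eq_filter source
    unfold PySem.Set.inter PySem.Set.len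
    rw [← List.countP_eq_length_filter]
    rw [hs, List.countP_filter]
    rw [zero_add, hlen]
    congr 1
    apply List.countP_congr
    intro i hi
    have hrange := PySem.List.mem_pyRange_one.mp hi
    have hmemiff : (pvNonzeroIdx loc).contains i = (PySem.List.pyGetD loc i 0 != 0) := by
      rw [Bool.eq_iff_iff, bne_iff_ne]
      rw [PySem.Set.contains_iff, mem_pvNonzeroIdx]
      constructor
      · exact fun h => h.2.2
      · intro h; exact ⟨hrange.1, by omega, h⟩
    rw [hmemiff, Bool.and_comm]
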